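-- pv_equiv track=rewrite | github.com/rstdoc/rstdoc | src/rstdoc/retable.py | unify_table
-- ===== SOURCE A (Python) =====
-- def unify_table(table):
--     """Given a list of rows (i.e. a table), this function returns a new table
--     in which all rows have an equal amount of columns.  If all full column is
--     empty (i.e. all rows have that field empty), the column is removed.
--
--     """
--     max_fields = max(map(lambda row: len(row), table))
--     empty_cols = [True] * max_fields
--     output = []
--     for row in table:
--         curr_len = len(row)
--         if curr_len < max_fields:
--             row += [''] * (max_fields - curr_len)
--         output.append(row)
--
--         # register empty columns (to be removed at the end)
--         for i in range(len(row)):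
--             if row[i].strip():
--                 empty_cols[i] = False
--
--     # remove empty columns from all rows
--     table = output
--     output = []
--     for row in table:
--         cols = []
--         for i in range(len(row)):
--             should_remove = empty_cols[i]
--             if not should_remove:
--                 cols.append(row[i])
--         output.append(cols)
--
--     return output
-- ===== SOURCE B (Python) =====
-- def unify_table(table):
--     """Given a list of rows (i.e. a table), this function returns a new table
--     in which all rows have an equal amount of columns.  If all full column is
--     empty (i.e. all rows have that field empty), the column is removed.
--
--     """
--     max_fields = max(map(len, table))
--     for row in table:
--         row += [''] * (max_fields - len(row))
--     kept = [col for col in zip(*table) if any(cell.strip() for cell in col)]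
--     rows = [list(r) for r in zip(*kept)]
--     return rows if kept else [[] for _ in table]
-- ===== Notes on version B (the rewrite author's own statement) =====
-- stated objective: idiomatic
-- what changed: Replaces A's row-wise double pass with a mutated empty_cols boolean array by a transposition-based approach: pad, transpose to columns with zip(*table), keep the columns containing any non-blank cell, and transpose the kept columns back with zip(*kept) (in-place padding side effect kept; equivalence is about the return value).
import Mathlib
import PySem

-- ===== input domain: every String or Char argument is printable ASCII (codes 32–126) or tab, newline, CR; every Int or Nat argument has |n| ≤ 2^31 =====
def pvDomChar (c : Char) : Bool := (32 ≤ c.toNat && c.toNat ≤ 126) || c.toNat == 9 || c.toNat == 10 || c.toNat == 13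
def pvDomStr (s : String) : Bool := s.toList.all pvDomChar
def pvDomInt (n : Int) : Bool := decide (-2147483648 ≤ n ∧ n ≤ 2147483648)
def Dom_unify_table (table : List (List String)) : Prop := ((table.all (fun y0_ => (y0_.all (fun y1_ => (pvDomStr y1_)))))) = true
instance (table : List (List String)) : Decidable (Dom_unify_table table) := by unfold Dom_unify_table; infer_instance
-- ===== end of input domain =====

-- B pads, then works by transposition (zip(*table), keep non-blank columns, zip back); equivalence is about the return value (both Pythons pad the caller's rows in place).

-- ===== PORT A =====
def unify_table (table : List (List String)) : List (List String) :=
  let max_fields := ((table.map (fun row => row.length)).max?).getD 0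
  let step1 := table.foldl (fun (acc : List (List String) × List Bool) row =>
      let row := if row.length < max_fields then row ++ List.replicate (max_fields - row.length) "" else row
      let ec := (List.range row.length).foldl (fun ec i =>
          if PySem.Str.strip (row.getD i "") != "" then ec.set i false else ec) acc.2
      (acc.1 ++ [row], ec)) ([], List.replicate max_fields true)
  let empty_cols := step1.2
  step1.1.foldl (fun out row =>
    out ++ [(List.range row.length).foldl (fun cols i =>
        if !(empty_cols.getD i true) then cols ++ [row.getD i ""] else cols) []]) []

-- ===== PORT B =====
-- port of Python's zip(*rows) on lists of strings (list of the columns, truncated to the shortest row)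
def pyZipStar (rows : List (List String)) : List (List String) :=
  if rows.isEmpty then []
  else (List.range (((rows.map List.length).min?).getD 0)).map (fun i => rows.map (fun r => r.getD i ""))

def unify_table_alt (table : List (List String)) : List (List String) :=
  let max_fields := ((table.map (fun row => row.length)).max?).getD 0
  let padded := table.map (fun row => row ++ List.replicate (max_fields - row.length) "")
  let kept := (pyZipStar padded).filter (fun col => col.any (fun cell => PySem.Str.strip cell != ""))
  let rows := pyZipStar kept
  if kept.isEmpty then table.map (fun _ => []) else rows

-- ===== PRECONDITION & SPEC =====
-- Pre_ excludes only the empty table, on which Python A raises ValueError (max() of an empty sequence); Python B raises there too.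
def Pre_unify_table (table : List (List String)) : Prop := table ≠ []
instance (table : List (List String)) : Decidable (Pre_unify_table table) := by unfold Pre_unify_table; infer_instance
def pvWitness_unify_table : List (List String) := [["a", ""], [" "]]

def Spec_unify_table (table : List (List String)) (out : List (List String)) : Prop := out = unify_table_alt table
instance (table : List (List String)) (out : List (List String)) : Decidable (Spec_unify_table table out) := by unfold Spec_unify_table; infer_instance

-- ===== CLAIM (what is proved, stated in full; the proofs are below) =====
def Claim_equal_unify_table : Prop := ∀ (table : List (List String)), Dom_unify_table table → Pre_unify_table table → Spec_unify_table table (unify_table table)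

-- ===== LEMMAS AND PROOFS =====

-- the (unconditional) padding both Pythons perform
def pvPad (n : ℕ) (r : List String) : List String := r ++ List.replicate (n - r.length) ""

-- whether cell i of row r survives
def pvKeep (r : List String) (i : ℕ) : Bool := PySem.Str.strip (r.getD i "") != ""

theorem pvPad_ite (n : ℕ) (r : List String) :
    (if r.length < n then r ++ List.replicate (n - r.length) "" else r) = pvPad n r := by
  unfold pvPad
  split_ifs with h
  · rfl
  · have : n - r.length = 0 := by omega
    simp [this]

theorem pvPad_length {n : ℕ} {r : List String} (h : r.length ≤ n) : (pvPad n r).length = n := by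
  simp [pvPad]; omega

-- inner loop of A's first pass: register the nonempty cells of row r
theorem pvInner_length (r : List String) (m : ℕ) (ec : List Bool) :
    ((List.range m).foldl (fun ec i => if pvKeep r i then ec.set i false else ec) ec).length
      = ec.length := by
  induction m generalizing ec with
  | zero => simp
  | succ k ih =>
    rw [List.range_succ, List.foldl_append, List.foldl_cons, List.foldl_nil]
    split_ifs <;> simp [ih]

theorem pvInner_getD (r : List String) (m : ℕ) (ec : List Bool) (j : ℕ) (hj : j < ec.length) :
    ((List.range m).foldl (fun ec i => if pvKeep r i then ec.set i false else ec) ec).getD j true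
      = (ec.getD j true && !(decide (j < m) && pvKeep r j)) := by
  induction m with
  | zero => simp
  | succ k ih =>
    rw [List.range_succ, List.foldl_append, List.foldl_cons, List.foldl_nil]
    have hF := pvInner_length r k ec
    by_cases hk : pvKeep r k
    · rw [if_pos hk, List.getD_eq_getElem?_getD, List.getElem?_set]
      by_cases hjk : k = j
      · subst hjk
        rw [if_pos rfl, if_pos (by omega : k < _)]
        simp [hk]
      · rw [if_neg hjk, ← List.getD_eq_getElem?_getD, ih]
        by_cases hkeep : pvKeep r j
        · have : (j < k) = (j < k + 1) := by
            apply propext; constructor <;> intro <;> omega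
          simp [hkeep, this]
        · simp [hkeep]
    · rw [if_neg hk, ih]
      by_cases hjk : j = k
      · subst hjk; simp [hk]
      · by_cases hkeep : pvKeep r j
        · have : (j < k) = (j < k + 1) := by
            apply propext; constructor <;> intro <;> omega
          simp [hkeep, this]
        · simp [hkeep]

-- A's first pass, as a fold over rows (rows already named padded)
theorem pvOuter_eq (n : ℕ) (ts : List (List String)) (out0 : List (List String)) (ec0 : List Bool)
    (h : ∀ r ∈ ts, r.length ≤ n) :
    ts.foldl (fun (acc : List (List String) × List Bool) row =>
        ((acc.1 ++ [if row.length < n then row ++ List.replicate (n - row.length) "" else row]),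
         (List.range (if row.length < n then row ++ List.replicate (n - row.length) "" else row).length).foldl
            (fun ec i =>
              if PySem.Str.strip ((if row.length < n then row ++ List.replicate (n - row.length) "" else row).getD i "") != ""
              then ec.set i false else ec) acc.2)) (out0, ec0)
      = (out0 ++ ts.map (pvPad n),
         ts.foldl (fun ec r =>
            (List.range n).foldl (fun ec i => if pvKeep (pvPad n r) i then ec.set i false else ec) ec) ec0) := by
  induction ts generalizing out0 ec0 with
  | nil => simp
  | cons r ts ih =>
    rw [List.foldl_cons, List.foldl_cons]
    have hr : r.length ≤ n := h r (List.mem_cons_self ..)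
    have hts : ∀ x ∈ ts, x.length ≤ n := fun x hx => h x (List.mem_cons_of_mem _ hx)
    rw [ih _ _ hts]
    simp only [pvPad_ite, pvPad_length hr, pvKeep, List.map_cons, List.cons_append,
      List.append_assoc, List.nil_append]
    rfl

theorem pvEcFold_getD (n : ℕ) (ts : List (List String)) (ec : List Bool) (j : ℕ)
    (hj : j < ec.length) :
    (ts.foldl (fun ec r =>
        (List.range n).foldl (fun ec i => if pvKeep (pvPad n r) i then ec.set i false else ec) ec) ec).getD j true
      = (ec.getD j true && ts.all (fun r => !(decide (j < n) && pvKeep (pvPad n r) j))) := by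
  induction ts generalizing ec with
  | nil => simp
  | cons r ts ih =>
    rw [List.foldl_cons, ih _ (by rw [pvInner_length]; exact hj),
      pvInner_getD _ _ _ _ hj, List.all_cons, Bool.and_assoc]

theorem pvNotAllNot {α : Type} (l : List α) (p : α → Bool) :
    (!(l.all fun x => !p x)) = l.any p := by
  induction l with
  | nil => rfl
  | cons a l ih => simp [List.all_cons, List.any_cons, ← ih, Bool.not_and, Bool.not_not]

-- characterisation of A: padded rows, each restricted to the globally kept indices
theorem pvA_char (table : List (List String)) (hpre : table ≠ []) :
    unify_table table
      = (table.map (pvPad (((table.map (fun row => row.length)).max?).getD 0))).map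
          (fun r => ((List.range (((table.map (fun row => row.length)).max?).getD 0)).filter
              (fun i => (table.map (pvPad (((table.map (fun row => row.length)).max?).getD 0))).any
                  (fun r' => pvKeep r' i))).map (fun i => r.getD i "")) := by
  unfold unify_table
  simp only []
  set n := ((table.map (fun row => row.length)).max?).getD 0 with hn
  have hle : ∀ r ∈ table, r.length ≤ n := by
    intro r hr
    cases h : (table.map (fun row => row.length)).max? with
    | none =>
      exact absurd (List.map_eq_nil_iff.mp (List.max?_eq_none_iff.mp h)) hpre
    | some m =>
      have hm := (List.max?_eq_some_iff.mp h).2 r.length (List.mem_map_of_mem hr)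
      rw [hn, h]; exact hm
  rw [pvOuter_eq n table [] (List.replicate n true) hle,
    PySem.List.foldl_append_singleton_eq_map]
  simp only [List.nil_append, List.map_map]
  apply List.map_congr_left
  intro r hr
  simp only [Function.comp]
  rw [PySem.List.foldl_append_if]
  simp only [List.nil_append]
  rw [pvPad_length (hle r hr)]
  congr 1
  apply List.filter_congr
  intro i hi
  have hin : i < n := List.mem_range.mp hi
  rw [pvEcFold_getD n table (List.replicate n true) i (by simpa using hin)]
  have hrep : (List.replicate n true).getD i true = true := by
    rw [List.getD_eq_getElem?_getD]; simp
  rw [hrep, Bool.true_and]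
  have hfun : (fun r : List String => !(decide (i < n) && pvKeep (pvPad n r) i))
      = fun r => !pvKeep (pvPad n r) i := by
    funext r; simp [hin]
  rw [hfun, pvNotAllNot, List.any_map]
  rfl

-- B-side helper lemmas -------------------------------------------------------

theorem pvFoldlMin_replicate (k c : ℕ) : (List.replicate k c).foldl min c = c := by
  induction k with
  | zero => rfl
  | succ k ih => simp [List.replicate_succ, List.foldl_cons, min_self, ih]

theorem pvMin?_constMap {α : Type} (l : List α) (h : l ≠ []) (c : ℕ) :
    (l.map (fun _ => c)).min? = some c := by
  cases l with
  | nil => exact absurd rfl h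
  | cons a l =>
    have : (l.map fun _ => c) = List.replicate l.length c := by
      induction l with
      | nil => rfl
      | cons b l ih => simp [List.replicate_succ, ih]
    simp only [List.map_cons, this, List.min?_cons', pvFoldlMin_replicate]

theorem pvGetD_map_lt {α β : Type} (l : List α) (f : α → β) (j : ℕ) (d : β) (dl : α)
    (hj : j < l.length) : (l.map f).getD j d = f (l.getD j dl) := by
  rw [List.getD_eq_getElem?_getD, List.getElem?_map, List.getElem?_eq_getElem hj,
    List.getD_eq_getElem?_getD, List.getElem?_eq_getElem hj]
  rfl

theorem pvMapRange_getD {α β : Type} (l : List α) (f : α → β) (d : α) :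
    (List.range l.length).map (fun j => f (l.getD j d)) = l.map f := by
  apply List.ext_getElem
  · simp
  · intro j h1 h2
    simp only [List.getElem_map, List.getElem_range]
    rw [List.getD_eq_getElem?_getD, List.getElem?_eq_getElem (by simpa using h2)]
    rfl

-- zip(*rows) of a nonempty rectangular list of rows of length n
theorem pvZipStar_rect (rows : List (List String)) (n : ℕ) (h0 : rows ≠ [])
    (hlen : ∀ r ∈ rows, r.length = n) :
    pyZipStar rows = (List.range n).map (fun i => rows.map (fun r => r.getD i "")) := by
  unfold pyZipStar
  rw [if_neg (by simpa using h0)]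
  have : rows.map List.length = rows.map (fun _ => n) :=
    List.map_congr_left (fun r hr => hlen r hr)
  rw [this, pvMin?_constMap rows h0 n]
  rfl

-- ===== VERDICT (by name: the statement is the Claim_ definition above) =====
theorem unify_table_spec : Claim_equal_unify_table := by
  intro table _ hpre
  unfold Spec_unify_table unify_table_alt
  simp only []
  set n := ((table.map (fun row => row.length)).max?).getD 0 with hn
  have hle : ∀ r ∈ table, r.length ≤ n := by
    intro r hr
    cases h : (table.map (fun row => row.length)).max? with
    | none =>
      exact absurd (List.map_eq_nil_iff.mp (List.max?_eq_none_iff.mp h)) hpre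
    | some m =>
      have hm := (List.max?_eq_some_iff.mp h).2 r.length (List.mem_map_of_mem hr)
      rw [hn, h]; exact hm
  have hpadded : (table.map fun row => row ++ List.replicate (n - row.length) "")
      = table.map (pvPad n) := by
    simp [pvPad]
  rw [hpadded]
  set padded := table.map (pvPad n) with hpdef
  have hpne : padded ≠ [] := by
    simp only [hpdef, ne_eq, List.map_eq_nil_iff]
    exact hpre
  have hplen : ∀ r ∈ padded, r.length = n := by
    intro r hr
    rcases List.mem_map.mp hr with ⟨r0, hr0, rfl⟩
    exact pvPad_length (hle r0 hr0)
  rw [pvZipStar_rect padded n hpne hplen]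
  rw [List.filter_map]
  set q : ℕ → Bool := fun i => padded.any (fun r' => pvKeep r' i) with hq
  have hqi : ((fun col : List String => col.any fun cell => PySem.Str.strip cell != "") ∘
      fun i => padded.map fun r => r.getD i "") = q := by
    funext i
    simp only [Function.comp, List.any_map, hq, pvKeep]
    rfl
  rw [hqi]
  set idxs := (List.range n).filter q with hidxs
  rw [pvA_char table hpre, ← hn, ← hpdef, ← hq, ← hidxs]
  by_cases hempty : idxs = []
  · rw [hempty]
    simp [hpdef, Function.comp_def, List.map_const']
  · have hkne : idxs.map (fun i => padded.map fun r => r.getD i "") ≠ [] := by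
      simpa using hempty
    rw [if_neg (by simpa using hkne)]
    have hklen : ∀ c ∈ idxs.map (fun i => padded.map fun r => r.getD i ""),
        c.length = padded.length := by
      intro c hc
      rcases List.mem_map.mp hc with ⟨i, _, rfl⟩
      simp
    rw [pvZipStar_rect _ padded.length hkne hklen]
    have hrow : ∀ j ∈ List.range padded.length,
        ((idxs.map (fun i => padded.map fun r => r.getD i "")).map (fun c => c.getD j ""))
          = idxs.map (fun i => (padded.getD j []).getD i "") := by
      intro j hj
      have hjl : j < padded.length := List.mem_range.mp hj
      rw [List.map_map]
      apply List.map_congr_left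
      intro i _
      simp only [Function.comp]
      exact pvGetD_map_lt padded (fun r => r.getD i "") j "" [] hjl
    rw [List.map_congr_left hrow,
      pvMapRange_getD padded (fun r => idxs.map (fun i => r.getD i "")) []]
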